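-- pv_equiv track=rewrite | github.com/ThivankaD/MCP | pr_agent_server/app/tools/pr_template.py | suggest_pr_template
-- ===== SOURCE A (Python) =====
-- def suggest_pr_template(changed_files: list[str]) -> str:
--     """
--     Select PR template based on changed files.
--     """
--
--     if any("frontend" in f for f in changed_files):
--         return "frontend-template.md"
--
--     if any("api" in f for f in changed_files):
--         return "backend-template.md"
--
--     if any("ml" in f or "model" in f for f in changed_files):
--         return "llm-template.md"
--
--     if any(".github/workflows" in f for f in changed_files):
--         return "devops-template.md"
--
--     return "general-template.md"
-- ===== SOURCE B (Python) =====
-- def suggest_pr_template(changed_files: list[str]) -> str: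
--     """One pass over changed_files collecting category flags, then a fixed priority decision."""
--     fe = api = ml = wf = False
--     for f in changed_files:
--         fe = fe or "frontend" in f
--         api = api or "api" in f
--         ml = ml or "ml" in f or "model" in f
--         wf = wf or ".github/workflows" in f
--     if fe:
--         return "frontend-template.md"
--     if api:
--         return "backend-template.md"
--     if ml:
--         return "llm-template.md"
--     if wf:
--         return "devops-template.md"
--     return "general-template.md"
-- ===== Notes on version B (the rewrite author's own statement) =====
-- stated objective: alternative
-- what changed: Replaced four short-circuiting any() scans of changed_files by a single fold that collects four category flags, followed by a constant priority decision.
import Mathlib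
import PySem

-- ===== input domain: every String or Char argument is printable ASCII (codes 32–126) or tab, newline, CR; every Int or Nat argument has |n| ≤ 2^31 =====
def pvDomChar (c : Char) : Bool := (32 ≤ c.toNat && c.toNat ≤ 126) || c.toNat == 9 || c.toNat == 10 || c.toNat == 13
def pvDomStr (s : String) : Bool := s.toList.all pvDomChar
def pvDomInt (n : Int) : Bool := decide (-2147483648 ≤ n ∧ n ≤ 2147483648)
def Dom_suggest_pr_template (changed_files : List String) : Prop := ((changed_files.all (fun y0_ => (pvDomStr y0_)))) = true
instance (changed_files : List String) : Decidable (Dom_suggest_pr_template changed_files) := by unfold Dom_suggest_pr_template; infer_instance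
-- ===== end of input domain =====

-- B replaces A's four short-circuiting scans by one fold collecting category flags plus a
-- constant priority decision (objective: alternative decomposition, same cost).

-- ===== PORT A =====
def suggest_pr_template (changed_files : List String) : String :=
  if changed_files.any (fun f => PySem.Str.isIn "frontend" f) then
    "frontend-template.md"
  else if changed_files.any (fun f => PySem.Str.isIn "api" f) then
    "backend-template.md"
  else if changed_files.any (fun f => PySem.Str.isIn "ml" f || PySem.Str.isIn "model" f) then
    "llm-template.md"
  else if changed_files.any (fun f => PySem.Str.isIn ".github/workflows" f) then
    "devops-template.md"
  else
    "general-template.md"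

-- ===== PORT B =====
def suggest_pr_template_alt (changed_files : List String) : String :=
  let flags := changed_files.foldl
    (fun (st : Bool × Bool × Bool × Bool) f =>
      (st.1 || PySem.Str.isIn "frontend" f,
       st.2.1 || PySem.Str.isIn "api" f,
       st.2.2.1 || PySem.Str.isIn "ml" f || PySem.Str.isIn "model" f,
       st.2.2.2 || PySem.Str.isIn ".github/workflows" f))
    (false, false, false, false)
  if flags.1 then "frontend-template.md"
  else if flags.2.1 then "backend-template.md"
  else if flags.2.2.1 then "llm-template.md"
  else if flags.2.2.2 then "devops-template.md"
  else "general-template.md"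

-- ===== PRECONDITION & SPEC =====
def Spec_suggest_pr_template (changed_files : List String) (out : String) : Prop := out = suggest_pr_template_alt changed_files
instance (changed_files : List String) (out : String) : Decidable (Spec_suggest_pr_template changed_files out) := by unfold Spec_suggest_pr_template; infer_instance

-- ===== CLAIM (what is proved, stated in full; the proofs are below) =====
def Claim_equal_suggest_pr_template : Prop := ∀ (changed_files : List String), Dom_suggest_pr_template changed_files → Spec_suggest_pr_template changed_files (suggest_pr_template changed_files)

-- ===== LEMMAS AND PROOFS =====

-- The fold's accumulator is the pointwise 'or' of the four membership scans.
theorem pv_fold_flags (l : List String) (a b c d : Bool) :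
    l.foldl
      (fun (st : Bool × Bool × Bool × Bool) f =>
        (st.1 || PySem.Str.isIn "frontend" f,
         st.2.1 || PySem.Str.isIn "api" f,
         st.2.2.1 || PySem.Str.isIn "ml" f || PySem.Str.isIn "model" f,
         st.2.2.2 || PySem.Str.isIn ".github/workflows" f))
      (a, b, c, d)
    = (a || l.any (fun f => PySem.Str.isIn "frontend" f),
       b || l.any (fun f => PySem.Str.isIn "api" f),
       c || l.any (fun f => PySem.Str.isIn "ml" f || PySem.Str.isIn "model" f),
       d || l.any (fun f => PySem.Str.isIn ".github/workflows" f)) := by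
  induction l generalizing a b c d with
  | nil => simp
  | cons x xs ih =>
    simp only [List.foldl_cons, List.any_cons, ih]
    simp [Bool.or_assoc]

-- ===== VERDICT (by name: the statement is the Claim_ definition above) =====
theorem suggest_pr_template_spec : Claim_equal_suggest_pr_template := by
  intro l _
  unfold Spec_suggest_pr_template suggest_pr_template suggest_pr_template_alt
  simp only [pv_fold_flags, Bool.false_or]
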